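-- pv_equiv track=rewrite | github.com/intel/torch-xpu-ops | .github/scripts/compare-e2e.py | _merge_accuracy_records
-- ===== SOURCE A (Python) =====
-- def _merge_accuracy_records(records: list[dict]) -> dict:
--     """
--     Merge multiple accuracy records for the same key.
--     Prefer 'pass' over 'fail', otherwise take the first.
--     """
--     pass_recs = [r for r in records if 'pass' in str(r['accuracy'])]
--     if pass_recs:
--         return pass_recs[0]
--     fail_recs = [r for r in records if 'fail' in str(r['accuracy'])]
--     if fail_recs:
--         return fail_recs[0]
--     return records[0]
-- ===== SOURCE B (Python) =====
-- def _merge_accuracy_records(records: list[dict]) -> dict: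
--     """
--     Merge multiple accuracy records for the same key.
--     Prefer 'pass' over 'fail', otherwise take the first.
--     Reduce to an extremal-element problem: score each record
--     (0 = pass, 1 = fail, 2 = other) and take the minimum-score record;
--     min() returns the FIRST record achieving the minimum.
--     """
--     def _rank(r):
--         acc = str(r['accuracy'])
--         return 0 if 'pass' in acc else 1 if 'fail' in acc else 2
--     return min(records, key=_rank)
-- ===== Notes on version B (the rewrite author's own statement) =====
-- stated objective: alternative
-- what changed: Replaces A's staged filter-then-head priority chain with a reduction to a minimum-by-key selection: each record is scored 0/1/2 (pass/fail/other) and min(records, key=rank) returns the first minimum-score record.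
import Mathlib
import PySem

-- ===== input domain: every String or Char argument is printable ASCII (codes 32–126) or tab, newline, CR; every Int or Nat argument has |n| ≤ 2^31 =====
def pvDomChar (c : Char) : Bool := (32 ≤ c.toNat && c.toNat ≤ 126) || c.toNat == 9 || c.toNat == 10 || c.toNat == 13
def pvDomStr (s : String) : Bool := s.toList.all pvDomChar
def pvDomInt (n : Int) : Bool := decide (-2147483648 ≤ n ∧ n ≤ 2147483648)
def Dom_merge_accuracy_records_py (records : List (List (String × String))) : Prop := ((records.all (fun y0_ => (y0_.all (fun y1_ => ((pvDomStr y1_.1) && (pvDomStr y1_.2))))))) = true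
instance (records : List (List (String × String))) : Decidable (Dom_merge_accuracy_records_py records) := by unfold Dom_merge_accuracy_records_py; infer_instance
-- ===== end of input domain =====

-- B replaces A's staged filter-then-head priority chain with a minimum-by-key selection:
-- records are scored 0/1/2 (pass/fail/other) and min(records, key=rank) picks the first
-- minimum-score record. Same cost class; the equivalence is about return values only.

-- str(r['accuracy']) — first-match association-list lookup (a missing key is a KeyError,
-- excluded by Pre_, so the "" default is never the value the claim is about).
def pvAccOf (r : List (String × String)) : String :=
  ((r.find? (fun p => p.1 == "accuracy")).map Prod.snd).getD ""

-- ===== PORT A =====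
def merge_accuracy_records_py (records : List (List (String × String))) : List (String × String) :=
  let pass_recs := records.filter (fun r => PySem.Str.isIn "pass" (pvAccOf r))
  match pass_recs with
  | r :: _ => r
  | [] =>
    let fail_recs := records.filter (fun r => PySem.Str.isIn "fail" (pvAccOf r))
    match fail_recs with
    | r :: _ => r
    | [] => records.headD []

-- ===== PORT B =====
-- _rank(r): 0 if 'pass' in str(r['accuracy']) else 1 if 'fail' in it else 2
def pvRank (r : List (String × String)) : Int :=
  if PySem.Str.isIn "pass" (pvAccOf r) then 0
  else if PySem.Str.isIn "fail" (pvAccOf r) then 1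
  else 2

-- min(records, key=_rank); min? = none only on [] (Python: ValueError, excluded by Pre_)
def merge_accuracy_records_py_alt (records : List (List (String × String))) : List (String × String) :=
  (PySem.List.min? records pvRank).getD []

-- ===== PRECONDITION & SPEC =====
-- Pre_ excludes exactly the inputs where A raises: the empty list (IndexError) and any
-- record without an 'accuracy' key (KeyError).
def Pre_merge_accuracy_records_py (records : List (List (String × String))) : Prop :=
  records ≠ [] ∧ ∀ r ∈ records, "accuracy" ∈ r.map Prod.fst
instance (records : List (List (String × String))) : Decidable (Pre_merge_accuracy_records_py records) := by unfold Pre_merge_accuracy_records_py; infer_instance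

def pvWitness_merge_accuracy_records_py : (List (List (String × String))) :=
  [[("accuracy", "fail"), ("name", "m1")], [("accuracy", "pass")]]

def Spec_merge_accuracy_records_py (records : List (List (String × String))) (out : List (String × String)) : Prop := out = merge_accuracy_records_py_alt records
instance (records : List (List (String × String))) (out : List (String × String)) : Decidable (Spec_merge_accuracy_records_py records out) := by unfold Spec_merge_accuracy_records_py; infer_instance

-- ===== CLAIM (what is proved, stated in full; the proofs are below) =====
def Claim_equal_merge_accuracy_records_py : Prop := ∀ (records : List (List (String × String))), Dom_merge_accuracy_records_py records → Pre_merge_accuracy_records_py records → Spec_merge_accuracy_records_py records (merge_accuracy_records_py records)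

-- ===== LEMMAS AND PROOFS =====

-- The running-minimum selection on a nonempty list returns the priority-first element:
-- the head if it passes, else the first passing element of the tail, else the head if it
-- fails, else the first failing element of the tail, else the head.
theorem min?_rank_cons (t : List (List (String × String))) (m : List (String × String)) :
    PySem.List.min? (m :: t) pvRank = some (
        if PySem.Str.isIn "pass" (pvAccOf m) then m
        else match t.find? (fun r => PySem.Str.isIn "pass" (pvAccOf r)) with
          | some r => r
          | none =>
            if PySem.Str.isIn "fail" (pvAccOf m) then m
            else match t.find? (fun r => PySem.Str.isIn "fail" (pvAccOf r)) with
              | some r => r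
              | none => m) := by
  induction t generalizing m with
  | nil =>
    simp only [PySem.List.min?, List.foldl_cons, List.foldl_nil, List.find?]
    split_ifs <;> rfl
  | cons x rest ih =>
    have h1 : PySem.List.min? (m :: x :: rest) pvRank
        = PySem.List.min? ((if pvRank x < pvRank m then x else m) :: rest) pvRank := by
      simp only [PySem.List.min?, List.foldl_cons]
      split_ifs <;> rfl
    rw [h1, ih]
    by_cases hpm : PySem.Chars.isIn ['p','a','s','s'] (pvAccOf m).toList = true <;>
    by_cases hpx : PySem.Chars.isIn ['p','a','s','s'] (pvAccOf x).toList = true <;>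
    by_cases hfm : PySem.Chars.isIn ['f','a','i','l'] (pvAccOf m).toList = true <;>
    by_cases hfx : PySem.Chars.isIn ['f','a','i','l'] (pvAccOf x).toList = true <;>
      simp [pvRank, PySem.Str.isIn, List.find?, hpm, hpx, hfm, hfx]

-- head of a filtered list = find?
theorem filter_match_eq_find? (l : List (List (String × String)))
    (q : List (String × String) → Bool) (d : List (String × String)) :
    (match l.filter q with
     | r :: _ => r
     | [] => d) =
      (match l.find? q with
       | some r => r
       | none => d) := by
  induction l with
  | nil => simp
  | cons r rest ih =>
    by_cases h : q r
    · simp [List.find?, h]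
    · simp only [List.filter_cons, List.find?, h]
      simpa using ih

-- ===== VERDICT (by name: the statement is the Claim_ definition above) =====
theorem merge_accuracy_records_py_spec : Claim_equal_merge_accuracy_records_py := by
  intro records _ _
  unfold Spec_merge_accuracy_records_py merge_accuracy_records_py merge_accuracy_records_py_alt
  cases records with
  | nil => rfl
  | cons x t =>
    rw [min?_rank_cons, Option.getD_some, filter_match_eq_find?]
    by_cases hpx : PySem.Chars.isIn ['p','a','s','s'] (pvAccOf x).toList = true
    · simp [List.find?, PySem.Str.isIn, hpx]
    · rw [filter_match_eq_find?]
      by_cases hfx : PySem.Chars.isIn ['f','a','i','l'] (pvAccOf x).toList = true <;>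
        simp only [List.find?, PySem.Str.isIn] <;>
        cases hp0 : List.find? (fun r => PySem.Chars.isIn "pass".toList (pvAccOf r).toList) t <;>
        simp [hpx, hfx]
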